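-- pv_equiv track=rewrite | github.com/konszymanski/leetcode-dataset | obfuscated_solutions/python/1334-find-the-city-with-the-smallest-number-of-neighbors-at-a-threshold-distance/solution_1_l0_l1_l3.py | v10_204
-- ===== SOURCE A (Python) =====
-- from typing import List
--
-- def v10_204(n: int, v3_125: List[List[int]], v21_338: int) -> int:
--     if len('abc') == 3:
--         v22_617 = -1
--     v23_716 = n
--     for v4_859 in range(n):
--         v_junk_42 = 71
--         v24_127 = sum((1 for v25_674 in range(n) if v4_859 != v25_674 and v3_125[v4_859][v25_674] <= v21_338))
--         if v24_127 <= v23_716: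
--             v23_716 = v24_127
--             v22_617 = v4_859
--     return v22_617
-- ===== SOURCE B (Python) =====
-- from typing import List
--
-- def v10_204(n: int, v3_125: List[List[int]], v21_338: int) -> int:
--     # Recursive suffix-best: best(i) = (count, city) minimal over rows i..n-1,
--     # later city winning ties via the strict '<' against the suffix best.
--     # Row counts come from the two slices around the diagonal, no per-element j != i test.
--     def best(i):
--         if i == n:
--             return (n, -1)
--         row = v3_125[i]
--         c = sum(1 for d in row[:i] if d <= v21_338) \
--             + sum(1 for d in row[i + 1:n] if d <= v21_338)
--         bc, bj = best(i + 1)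
--         return (c, i) if c < bc else (bc, bj)
--     return best(0)[1] if n > 0 else -1
-- ===== Notes on version B (the rewrite author's own statement) =====
-- stated objective: alternative
-- what changed: B replaces A's forward loop with an inline running-minimum state by a recursion over the row suffix that combines each row's count with the best of the later rows via a strict '<' comparison, and counts each row with two diagonal-splitting slices row[:i] and row[i+1:n] instead of A's j != i filtered scan over range(n).
-- outside the precondition, e.g. on v10_204(1, [], 0): A returns 0, B raises IndexError
import Mathlib
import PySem

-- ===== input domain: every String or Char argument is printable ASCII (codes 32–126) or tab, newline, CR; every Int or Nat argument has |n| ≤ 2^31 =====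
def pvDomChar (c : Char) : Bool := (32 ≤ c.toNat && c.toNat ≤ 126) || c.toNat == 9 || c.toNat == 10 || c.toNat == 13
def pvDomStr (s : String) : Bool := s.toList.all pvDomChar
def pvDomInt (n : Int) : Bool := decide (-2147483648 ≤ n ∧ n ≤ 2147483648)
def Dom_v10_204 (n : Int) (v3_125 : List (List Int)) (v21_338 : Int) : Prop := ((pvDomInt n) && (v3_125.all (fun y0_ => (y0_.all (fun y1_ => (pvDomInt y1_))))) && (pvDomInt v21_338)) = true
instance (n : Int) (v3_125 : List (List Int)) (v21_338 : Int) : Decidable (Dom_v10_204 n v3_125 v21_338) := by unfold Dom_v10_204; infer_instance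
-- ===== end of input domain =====

-- B replaces A's forward loop with a running minimum by a recursion over the row suffix
-- (strict '<' against the best of the later rows) and counts each row with two
-- diagonal-splitting slices instead of a j != i filtered scan.

-- ===== PORT A =====
-- inner generator sum of A: sum(1 for j in range(n) if i != j and v3[i][j] <= t)
def cntA (v3_125 : List (List Int)) (v21_338 n i : Int) : Int :=
  (PySem.List.pyRange 0 n 1).foldl (fun acc j =>
    if i ≠ j ∧ PySem.List.pyGetD (PySem.List.pyGetD v3_125 i []) j 0 ≤ v21_338
    then acc + 1 else acc) 0

def v10_204 (n : Int) (v3_125 : List (List Int)) (v21_338 : Int) : Int :=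
  -- v22_617 = -1 (the len('abc')==3 branch is always taken); v23_716 = n
  ((PySem.List.pyRange 0 n 1).foldl (fun (st : Int × Int) i =>
      let c := cntA v3_125 v21_338 n i
      if c ≤ st.2 then (i, c) else st) (-1, n)).1

-- ===== PORT B =====
-- c = sum(1 for d in row[:i] if d <= t) + sum(1 for d in row[i+1:n] if d <= t)
def cntB (v3_125 : List (List Int)) (v21_338 n i : Int) : Int :=
  (PySem.List.slice (PySem.List.pyGetD v3_125 i []) none (some i)).foldl
      (fun acc d => if d ≤ v21_338 then acc + 1 else acc) 0
  + (PySem.List.slice (PySem.List.pyGetD v3_125 i []) (some (i + 1)) (some n)).foldl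
      (fun acc d => if d ≤ v21_338 then acc + 1 else acc) 0

-- best(i): Python recursion from i to n; fuel k = n - i makes it structural
def bestB (v3_125 : List (List Int)) (v21_338 n : Int) : Nat → Int → Int × Int
  | 0, _ => (n, -1)
  | k + 1, i =>
    let c := cntB v3_125 v21_338 n i
    let p := bestB v3_125 v21_338 n k (i + 1)
    if c < p.1 then (c, i) else p

def v10_204_alt (n : Int) (v3_125 : List (List Int)) (v21_338 : Int) : Int :=
  if 0 < n then (bestB v3_125 v21_338 n n.toNat 0).2 else -1

-- ===== PRECONDITION & SPEC =====
-- Pre_ excludes exactly the inputs where A raises IndexError (a needed v3_125[i][j] is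
-- missing) and additionally requires row 0 to exist when n == 1: there A returns 0 without
-- ever touching the matrix, while B's recursion reads v3_125[0] and raises IndexError.
def Pre_v10_204 (n : Int) (v3_125 : List (List Int)) (v21_338 : Int) : Prop :=
  0 < n → (n.toNat ≤ v3_125.length ∧
    ∀ i < n.toNat, ∀ j < n.toNat, i ≠ j → j < (v3_125.getD i []).length)
instance (n : Int) (v3_125 : List (List Int)) (v21_338 : Int) : Decidable (Pre_v10_204 n v3_125 v21_338) := by unfold Pre_v10_204; infer_instance

def pvWitness_v10_204 : Int × List (List Int) × Int := (2, [[0, 1], [1, 0]], 1)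

def Spec_v10_204 (n : Int) (v3_125 : List (List Int)) (v21_338 : Int) (out : Int) : Prop := out = v10_204_alt n v3_125 v21_338
instance (n : Int) (v3_125 : List (List Int)) (v21_338 : Int) (out : Int) : Decidable (Spec_v10_204 n v3_125 v21_338 out) := by unfold Spec_v10_204; infer_instance

-- ===== CLAIM (what is proved, stated in full; the proofs are below) =====
def Claim_equal_v10_204 : Prop := ∀ (n : Int) (v3_125 : List (List Int)) (v21_338 : Int), Dom_v10_204 n v3_125 v21_338 → Pre_v10_204 n v3_125 v21_338 → Spec_v10_204 n v3_125 v21_338 (v10_204 n v3_125 v21_338)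

-- ===== LEMMAS AND PROOFS =====

theorem pvRangeCast (n : Int) :
    PySem.List.pyRange 0 n 1 = (List.range n.toNat).map (fun k : Nat => (k : Int)) := by
  rw [PySem.List.pyRange_one]; simp only [zero_add, Int.sub_zero]

-- take as a map over range

theorem pvTakeMap (row : List Int) (I : Nat) (h : I ≤ row.length) :
    row.take I = (List.range I).map (fun k => row.getD k 0) := by
  apply List.ext_getElem
  · simp [h]
  · intro k h1 h2
    simp at h1 h2 ⊢
    rw [List.getElem?_eq_getElem (by omega)]
    rfl

-- middle slice as a map over range

theorem pvDropTakeMap (row : List Int) (I M : Nat) (h : ∀ k < M, I + 1 + k < row.length) :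
    (row.drop (I + 1)).take M = (List.range M).map (fun k => row.getD (I + 1 + k) 0) := by
  apply List.ext_getElem
  · simp
    rcases Nat.eq_zero_or_pos M with hM | hM
    · omega
    · have := h (M - 1) (by omega); omega
  · intro k h1 h2
    simp at h1 h2 ⊢
    rw [List.getElem?_eq_getElem (by omega)]
    rfl

-- the two counts agree where the needed row entries exist

theorem pvCntEq (v3 : List (List Int)) (t n i : Int) (h0 : 0 ≤ i) (hi : i < n)
    (hrow : ∀ j < n.toNat, j ≠ i.toNat → j < (PySem.List.pyGetD v3 i []).length) :
    cntA v3 t n i = cntB v3 t n i := by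
  set row := PySem.List.pyGetD v3 i [] with hrowdef
  set N := n.toNat with hN
  set I := i.toNat with hI
  have hiI : (I : Int) = i := by omega
  have hIN : I < N := by omega
  have hlenI : I ≤ row.length := by
    rcases Nat.eq_zero_or_pos I with h | h
    · omega
    · have := hrow (I - 1) (by omega) (by omega); omega
  -- LHS to countP over range N
  unfold cntA
  rw [pvRangeCast, List.foldl_map, PySem.List.foldl_ite_add_one]
  -- RHS to countP over the two slices
  unfold cntB
  rw [PySem.List.slice_to _ h0, PySem.List.slice_toNat _ (by omega) (by omega)]
  rw [PySem.List.foldl_ite_add_one, PySem.List.foldl_ite_add_one]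
  rw [← hrowdef, ← hI, ← hN]
  have hiN1 : (i + 1).toNat = I + 1 := by omega
  rw [hiN1]
  set M := N - (I + 1) with hM
  -- rewrite the two slices as maps
  rw [pvTakeMap row I hlenI, pvDropTakeMap row I M (fun k hk => hrow (I + 1 + k) (by omega) (by omega))]
  rw [List.countP_map, List.countP_map]
  -- split range N
  have hsplit : List.range N = (List.range I ++ [I]) ++ (List.range M).map (fun k => (I + 1) + k) := by
    rw [← List.range_succ, ← List.range_add]
    congr 1
    omega
  rw [hsplit, List.countP_append, List.countP_append]
  have e1 : (List.range I).countP (fun k : Nat => decide (i ≠ (k : Int) ∧ PySem.List.pyGetD row (k : Int) 0 ≤ t))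
      = (List.range I).countP ((fun d => decide (d ≤ t)) ∘ fun k => row.getD k 0) := by
    apply List.countP_congr
    intro k hk
    simp at hk
    simp [show i ≠ (k : Int) by omega, PySem.List.pyGetD_natCast]
  have e2 : ([I]).countP (fun k : Nat => decide (i ≠ (k : Int) ∧ PySem.List.pyGetD row (k : Int) 0 ≤ t)) = 0 := by
    simp [hiI]
  have e3 : ((List.range M).map (fun k => (I + 1) + k)).countP
        (fun k : Nat => decide (i ≠ (k : Int) ∧ PySem.List.pyGetD row (k : Int) 0 ≤ t))
      = (List.range M).countP ((fun d => decide (d ≤ t)) ∘ fun k => row.getD (I + 1 + k) 0) := by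
    rw [List.countP_map]
    apply List.countP_congr
    intro k hk
    simp at hk
    simp [PySem.List.pyGetD_natCast]
    intro _
    omega
  rw [e1, e2, e3]
  push_cast
  ring

-- each row's count is strictly below n (at most n-1 entries are counted)

theorem pvCntBLt (v3 : List (List Int)) (t n i : Int) (h0 : 0 ≤ i) (hi : i < n) :
    cntB v3 t n i < n := by
  unfold cntB
  rw [PySem.List.slice_to _ h0, PySem.List.slice_toNat _ (by omega) (by omega)]
  rw [PySem.List.foldl_ite_add_one, PySem.List.foldl_ite_add_one]
  set row := PySem.List.pyGetD v3 i []
  have h1 := List.countP_le_length (p := fun d => decide (d ≤ t)) (l := List.take i.toNat row)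
  have h2 := List.countP_le_length (p := fun d => decide (d ≤ t))
    (l := List.take (n.toNat - (i + 1).toNat) (List.drop (i + 1).toNat row))
  have l1 : (List.take i.toNat row).length ≤ i.toNat := by simp
  have l2 : (List.take (n.toNat - (i + 1).toNat) (List.drop (i + 1).toNat row)).length
      ≤ n.toNat - (i + 1).toNat := by simp
  omega

theorem pvKey (f : Int → Int) (m0 : Int) :
    ∀ N : Nat, 1 ≤ N → f 0 ≤ m0 →
    let st := (List.range N).foldl
      (fun st (k : Nat) => if f k ≤ st.2 then ((k : Int), f k) else st) (-1, m0)
    let cs := (List.range N).map (fun k : Nat => f k)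
    st.2 ∈ cs ∧ (∀ x ∈ cs, st.2 ≤ x) ∧
      ∃ r : Nat, PySem.List.index? cs.reverse st.2 = some r ∧ st.1 = (N : Int) - 1 - r := by
  intro N
  induction N with
  | zero => intro h; omega
  | succ N ih =>
    intro _ hf0
    by_cases hN : 1 ≤ N
    · obtain ⟨hmem, hmin, r, hidx, hst1⟩ := ih hN hf0
      set st := (List.range N).foldl
        (fun st (k : Nat) => if f k ≤ st.2 then ((k : Int), f k) else st) (-1, m0) with hstdef
      simp only [List.range_succ, List.foldl_append, List.foldl_cons, List.foldl_nil,
        List.map_append, List.map_cons, List.map_nil, List.reverse_append, List.reverse_cons,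
        List.reverse_nil, List.nil_append, List.cons_append]
      simp only [← hstdef]
      by_cases hle : f N ≤ st.2
      · simp only [hle, if_pos]
        refine ⟨by simp, ?_, 0, ?_, by push_cast; ring⟩
        · intro x hx
          rcases List.mem_append.mp hx with hx | hx
          · exact le_trans hle (hmin x hx)
          · simp at hx; omega
        · exact PySem.List.index?_cons_self _ _
      · simp only [hle, if_neg, not_false_iff]
        have hne : f N ≠ st.2 := by
          intro h; exact hle (le_of_eq h)
        refine ⟨List.mem_append.mpr (Or.inl hmem), ?_, r + 1, ?_, by push_cast; omega⟩
        · intro x hx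
          rcases List.mem_append.mp hx with hx | hx
          · exact hmin x hx
          · simp at hx; subst hx; omega
        · rw [PySem.List.index?_cons_of_ne _ hne, hidx]
          rfl
    · have hN0 : N = 0 := by omega
      subst hN0
      simp only [List.range_succ, List.range_zero, List.nil_append, List.foldl_cons,
        List.foldl_nil, List.map_cons, List.map_nil, List.reverse_cons, List.reverse_nil,
        List.nil_append, Nat.cast_zero, hf0, if_pos]
      refine ⟨by simp, by intro x hx; simp at hx; omega, 0, PySem.List.index?_cons_self _ _, by norm_num⟩

-- master invariant for B's suffix recursion

theorem pvKeyB (v3 : List (List Int)) (t n : Int) :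
    ∀ (k : Nat) (i : Int), 1 ≤ k → (∀ d : Nat, d < k → cntB v3 t n (i + d) < n) →
    let cs := (List.range k).map (fun d : Nat => cntB v3 t n (i + (d : Int)))
    let p := bestB v3 t n k i
    p.1 ∈ cs ∧ (∀ x ∈ cs, p.1 ≤ x) ∧
      ∃ r : Nat, PySem.List.index? cs.reverse p.1 = some r ∧ p.2 = i + ((k : Int) - 1 - r) := by
  intro k
  induction k with
  | zero => intro i h; omega
  | succ k ih =>
    intro i _ hlt
    by_cases hk : 1 ≤ k
    · obtain ⟨hmem, hmin, r, hidx, hp2⟩ := ih (i + 1) hk (fun d hd => by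
        have := hlt (d + 1) (by omega)
        push_cast at this
        rwa [show i + ((d : Int) + 1) = i + 1 + d by ring] at this)
      set p := bestB v3 t n k (i + 1) with hpdef
      have hcs : (List.range (k + 1)).map (fun d : Nat => cntB v3 t n (i + (d : Int)))
          = cntB v3 t n i :: (List.range k).map (fun d : Nat => cntB v3 t n (i + 1 + (d : Int))) := by
        rw [List.range_succ_eq_map]
        simp only [List.map_cons, List.map_map, Nat.cast_zero, add_zero]
        congr 1
        apply List.map_congr_left
        intro d _
        simp only [Function.comp]
        congr 1
        push_cast
        ring
      rw [hcs]
      show (bestB v3 t n (k + 1) i).1 ∈ _ ∧ _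
      simp only [bestB, ← hpdef]
      set c := cntB v3 t n i with hcdef
      by_cases hlt2 : c < p.1
      · simp only [hlt2, if_pos]
        refine ⟨by simp, ?_, ?_⟩
        · intro x hx
          rcases List.mem_cons.mp hx with hx | hx
          · omega
          · exact le_of_lt (lt_of_lt_of_le hlt2 (hmin x hx))
        · refine ⟨k, ?_, by push_cast; ring⟩
          rw [List.reverse_cons]
          have hnotmem : c ∉ ((List.range k).map (fun d : Nat => cntB v3 t n (i + 1 + (d : Int)))).reverse := by
            intro hc
            have := hmin c (List.mem_reverse.mp hc)
            omega
          rw [PySem.List.index?_append_singleton_self _ _ hnotmem]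
          simp
      · simp only [hlt2, if_neg, not_false_iff]
        refine ⟨List.mem_cons_of_mem _ hmem, ?_, ?_⟩
        · intro x hx
          rcases List.mem_cons.mp hx with hx | hx
          · omega
          · exact hmin x hx
        · refine ⟨r, ?_, by push_cast at hp2 ⊢; omega⟩
          rw [List.reverse_cons, PySem.List.index?_append_of_mem _ (List.mem_reverse.mpr hmem), hidx]
    · have hk0 : k = 0 := by omega
      subst hk0
      have hc := hlt 0 (by omega)
      simp only [Nat.cast_zero, add_zero] at hc
      have hred : bestB v3 t n 1 i = (cntB v3 t n i, i) := by
        have : bestB v3 t n 1 i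
            = if cntB v3 t n i < n then (cntB v3 t n i, i) else (n, -1) := rfl
        rw [this, if_pos hc]
      show (bestB v3 t n 1 i).1 ∈ _ ∧ _
      rw [hred]
      refine ⟨by simp, by intro x hx; simp at hx; omega, 0, ?_, by norm_num⟩
      have hrev : (List.map (fun d : Nat => cntB v3 t n (i + (d : Int))) (List.range 1)).reverse
          = [cntB v3 t n i] := by simp
      rw [hrev]
      exact PySem.List.index?_cons_self _ _

theorem pvMain (n : Int) (v3 : List (List Int)) (t : Int)
    (hpre : Pre_v10_204 n v3 t) :
    v10_204 n v3 t = v10_204_alt n v3 t := by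
  unfold Pre_v10_204 at hpre
  unfold v10_204 v10_204_alt
  by_cases hn : 0 < n
  · obtain ⟨hlen, hrows⟩ := hpre hn
    rw [if_pos hn]
    have hN : 1 ≤ n.toNat := by omega
    have hceq : ∀ k : Nat, k < n.toNat → cntA v3 t n (k : Int) = cntB v3 t n (0 + (k : Int)) := by
      intro k hk
      rw [zero_add]
      apply pvCntEq v3 t n (k : Int) (by omega) (by omega)
      intro j hj hne
      have hg : PySem.List.pyGetD v3 (k : Int) [] = v3.getD k [] := by
        simp [PySem.List.pyGetD_natCast]
      rw [hg]
      exact hrows k hk j hj (by omega)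
    have h00 : cntA v3 t n 0 = cntB v3 t n 0 := by
      have := hceq 0 hN
      simpa using this
    have hf0 : cntA v3 t n 0 ≤ n := by
      rw [h00]; exact le_of_lt (pvCntBLt v3 t n 0 le_rfl hn)
    have hA := pvKey (cntA v3 t n) n n.toNat hN hf0
    have hB := pvKeyB v3 t n n.toNat 0 hN (fun d hd => pvCntBLt v3 t n (0 + (d : Int)) (by omega) (by omega))
    simp only at hA hB
    obtain ⟨hmemA, hminA, rA, hidxA, hst1A⟩ := hA
    obtain ⟨hmemB, hminB, rB, hidxB, hp2B⟩ := hB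
    rw [pvRangeCast, List.foldl_map]
    set st := (List.range n.toNat).foldl
      (fun st (k : Nat) => if cntA v3 t n (k : Int) ≤ st.2 then ((k : Int), cntA v3 t n (k : Int)) else st)
      (-1, n) with hstdef
    set p := bestB v3 t n n.toNat 0 with hpdef
    have hcs : (List.range n.toNat).map (fun d : Nat => cntB v3 t n (0 + (d : Int)))
        = (List.range n.toNat).map (fun k : Nat => cntA v3 t n (k : Int)) :=
      List.map_congr_left (fun k hk => (hceq k (List.mem_range.mp hk)).symm)
    rw [hcs] at hmemB hminB hidxB
    have heq : st.2 = p.1 := le_antisymm (hminA p.1 hmemB) (hminB st.2 hmemA)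
    rw [heq] at hidxA
    have hr : rA = rB := by
      rw [hidxA] at hidxB
      exact (Option.some.inj hidxB)
    show st.1 = p.2
    rw [hst1A, hp2B, hr]
    ring
  · rw [if_neg hn]
    rw [pvRangeCast, show n.toNat = 0 by omega]
    rfl

-- ===== VERDICT (by name: the statement is the Claim_ definition above) =====
theorem v10_204_spec : Claim_equal_v10_204 := by
  intro n v3_125 v21_338 _ hpre
  unfold Spec_v10_204
  exact pvMain n v3_125 v21_338 hpre
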